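-- pv_equiv track=rewrite | github.com/jacobotmr/psimon_h7 | quantum/simon_improved.py | _is_lin_dependent
-- ===== SOURCE A (Python) =====
-- from typing import Tuple, List, Dict, Optional, Set
--
-- def _is_lin_dependent(vector: int, basis: List[int]) -> bool:
--     """
--     Check if vector is linearly dependent on basis in GF(2).
--
--     This is a Gaussian elimination in binary field.
--     """
--     if vector == 0:
--         return True
--     if not basis:
--         return False
--
--     # Try to express vector as XOR of basis elements
--     for mask in range(1, 2 ** len(basis)):
--         xor_result = 0
--         for i, b in enumerate(basis):
--             if mask & (1 << i):
--                 xor_result ^= b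
--         if xor_result == vector:
--             return True
--
--     return False
-- ===== SOURCE B (Python) =====
-- def _is_lin_dependent(vector, basis):
--     """Check if vector is linearly dependent on basis in GF(2).
--
--     Dynamic programming over the attainable span: maintain the set of all
--     XOR-combinations seen so far (deduplicated), one pass over the basis.
--     """
--     spans = {0}
--     for b in basis:
--         spans |= {s ^ b for s in spans}
--     return vector in spans
-- ===== Notes on version B (the rewrite author's own statement) =====
-- stated objective: alternative
-- what changed: A enumerates all 2^n subset masks and recomputes each XOR from scratch; B does one pass over the basis maintaining the deduplicated set of attainable XOR values (dynamic programming over the span), then tests membership.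
import Mathlib
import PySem

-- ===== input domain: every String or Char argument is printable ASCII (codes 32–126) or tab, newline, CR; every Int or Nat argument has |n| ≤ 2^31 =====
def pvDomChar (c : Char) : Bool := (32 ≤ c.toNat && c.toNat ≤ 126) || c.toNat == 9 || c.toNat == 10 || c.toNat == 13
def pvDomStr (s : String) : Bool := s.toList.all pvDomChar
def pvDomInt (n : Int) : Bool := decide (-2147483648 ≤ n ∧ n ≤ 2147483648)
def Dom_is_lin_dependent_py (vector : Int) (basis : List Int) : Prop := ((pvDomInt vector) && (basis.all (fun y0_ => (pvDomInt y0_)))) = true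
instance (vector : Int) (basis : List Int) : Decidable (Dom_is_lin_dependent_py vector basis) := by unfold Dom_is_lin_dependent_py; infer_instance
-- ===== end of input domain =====

-- B replaces A's enumeration of all 2^n subset masks by one pass that maintains the
-- deduplicated set of attainable XOR values (same results; different algorithm).

-- ===== PORT A =====
-- inner loop: xor_result = 0; for i, b in enumerate(basis): if mask & (1 << i): xor_result ^= b
-- (the enumerate index ib.1 is always ≥ 0, so `.toNat` is exact for Python's `1 << i`)
def xorOfMask (mask : Int) (basis : List Int) : Int :=
  (PySem.List.enumerate basis 0).foldl
    (fun acc ib => if PySem.Int.band mask ((1 : Int) <<< ib.1.toNat) ≠ 0 then PySem.Int.bxor acc ib.2 else acc) 0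

def is_lin_dependent_py (vector : Int) (basis : List Int) : Bool :=
  if vector == 0 then true
  else if basis.isEmpty then false
  else
    -- for mask in range(1, 2 ** len(basis)): … if xor_result == vector: return True / return False
    (PySem.List.pyRange 1 ((2 : Int) ^ basis.length) 1).any
      (fun mask => xorOfMask mask basis == vector)

-- ===== PORT B =====
-- spans |= {s ^ b for s in spans}  (building a new set from a set: order-independent)
def spanStep (sp : PySem.Set Int) (b : Int) : PySem.Set Int :=
  PySem.Set.update sp (sp.map (fun s => PySem.Int.bxor s b))

def is_lin_dependent_py_alt (vector : Int) (basis : List Int) : Bool :=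
  PySem.Set.contains (basis.foldl spanStep (PySem.Set.ofList [0])) vector

-- ===== PRECONDITION & SPEC =====
def Spec_is_lin_dependent_py (vector : Int) (basis : List Int) (out : Bool) : Prop := out = is_lin_dependent_py_alt vector basis
instance (vector : Int) (basis : List Int) (out : Bool) : Decidable (Spec_is_lin_dependent_py vector basis out) := by unfold Spec_is_lin_dependent_py; infer_instance

-- ===== CLAIM (what is proved, stated in full; the proofs are below) =====
def Claim_equal_is_lin_dependent_py : Prop := ∀ (vector : Int) (basis : List Int), Dom_is_lin_dependent_py vector basis → Spec_is_lin_dependent_py vector basis (is_lin_dependent_py vector basis)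

-- ===== LEMMAS AND PROOFS =====

-- bxor on the Int constructors, and associativity (comm/zero/self are PySem's)
theorem bxor_ofNat_ofNat (m n : Nat) : PySem.Int.bxor (m : Int) (n : Int) = ((m ^^^ n : Nat) : Int) := by
  simp [PySem.Int.bxor]

theorem bxor_ofNat_negSucc (m n : Nat) : PySem.Int.bxor (m : Int) (Int.negSucc n) = Int.negSucc (m ^^^ n) := by
  simp [PySem.Int.bxor, Int.negSucc_eq]; omega

theorem bxor_negSucc_ofNat (m n : Nat) : PySem.Int.bxor (Int.negSucc m) (n : Int) = Int.negSucc (m ^^^ n) := by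
  simp [PySem.Int.bxor, Int.negSucc_eq]; omega

theorem bxor_negSucc_negSucc (m n : Nat) : PySem.Int.bxor (Int.negSucc m) (Int.negSucc n) = ((m ^^^ n : Nat) : Int) := by
  simp [PySem.Int.bxor, Int.negSucc_eq]; omega

theorem bxor_assoc (a b c : Int) :
    PySem.Int.bxor (PySem.Int.bxor a b) c = PySem.Int.bxor a (PySem.Int.bxor b c) := by
  cases a <;> cases b <;> cases c <;>
    simp only [Int.ofNat_eq_natCast, bxor_ofNat_ofNat, bxor_ofNat_negSucc, bxor_negSucc_ofNat,
      bxor_negSucc_negSucc, Nat.xor_assoc]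

theorem zero_bxor (a : Int) : PySem.Int.bxor 0 a = a := by
  rw [PySem.Int.bxor_comm, PySem.Int.bxor_zero]

-- the XOR of the sub-list of `basis` selected by the bits of the mask `m`
def maskXor : Nat → List Int → Int
  | _, [] => 0
  | m, b :: rest => if m % 2 = 1 then PySem.Int.bxor b (maskXor (m / 2) rest) else maskXor (m / 2) rest

theorem maskXor_zero (L : List Int) : maskXor 0 L = 0 := by
  induction L with
  | nil => rfl
  | cons b rest ih => simp [maskXor, ih]

theorem band_shift_ne (m k : Nat) : (PySem.Int.band (m : Int) ((1 : Int) <<< (k : Int)) ≠ 0) ↔ m.testBit k = true := by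
  rw [show (1 : Int) <<< (k : Int) = ((1 <<< k : Nat) : Int) by
      rw [Int.shiftLeft_eq_mul_pow]; simp [Nat.shiftLeft_eq],
    PySem.Int.band_natCast]
  simp only [ne_eq, Int.natCast_eq_zero, Nat.shiftLeft_eq, Nat.one_mul, Nat.and_two_pow]
  cases m.testBit k <;> simp

theorem mod_two_testBit (m k : Nat) : ((m >>> k) % 2 = 1) ↔ (m.testBit k = true) := by
  simp [Nat.testBit, Nat.one_and_eq_mod_two]

theorem xorOfMask_go (m : Nat) (basis : List Int) : ∀ (k : Nat) (acc : Int),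
    (PySem.List.enumerate basis (k : Int)).foldl
      (fun acc ib => if PySem.Int.band (m : Int) ((1 : Int) <<< ib.1.toNat) ≠ 0 then PySem.Int.bxor acc ib.2 else acc) acc
    = PySem.Int.bxor acc (maskXor (m >>> k) basis) := by
  induction basis with
  | nil => intro k acc; simp [PySem.List.enumerate_nil, maskXor, PySem.Int.bxor_zero]
  | cons b rest ih =>
    intro k acc
    rw [PySem.List.enumerate_cons, List.foldl_cons,
      show ((k : Int) + 1) = ((k + 1 : Nat) : Int) by push_cast; ring, ih (k + 1)]
    have hsucc : (m >>> k) / 2 = m >>> (k + 1) := by rw [Nat.shiftRight_succ]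
    simp only [Int.toNat_natCast]
    rw [maskXor, hsucc]
    split_ifs with h1 h2 h2
    · rw [bxor_assoc]
    · exact absurd ((mod_two_testBit m k).mpr ((band_shift_ne m k).mp h1)) h2
    · exact absurd ((band_shift_ne m k).mpr ((mod_two_testBit m k).mp h2)) h1
    · rfl

theorem xorOfMask_eq (m : Nat) (basis : List Int) : xorOfMask (m : Int) basis = maskXor m basis := by
  have h := xorOfMask_go m basis 0 0
  simpa [xorOfMask, zero_bxor] using h

theorem A_char (v : Int) (basis : List Int) :
    is_lin_dependent_py v basis = true ↔ ∃ m : Nat, m < 2 ^ basis.length ∧ maskXor m basis = v := by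
  unfold is_lin_dependent_py
  by_cases hv : v = 0
  · subst hv
    simp only [BEq.rfl, if_pos, true_iff]
    exact ⟨0, Nat.two_pow_pos _, maskXor_zero basis⟩
  · rw [if_neg (by simpa using hv)]
    by_cases hb : basis = []
    · subst hb
      simp only [List.isEmpty_nil, if_pos]
      constructor
      · intro h; exact absurd h (by simp)
      · rintro ⟨m, hm, hx⟩
        have hm0 : m = 0 := by simpa using hm
        subst hm0
        exact absurd (by rw [← hx]; rfl) hv
    · rw [if_neg (by simpa [List.isEmpty_iff] using hb)]
      rw [List.any_eq_true]
      constructor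
      · rintro ⟨mask, hmem, heq⟩
        obtain ⟨h1, h2⟩ := PySem.List.mem_pyRange_one.mp hmem
        refine ⟨mask.toNat, ?_, ?_⟩
        · have : (mask.toNat : Int) < ((2 ^ basis.length : Nat) : Int) := by
            rw [Int.toNat_of_nonneg (by omega)]; exact_mod_cast h2
          exact_mod_cast this
        · rw [← xorOfMask_eq, Int.toNat_of_nonneg (by omega)]
          exact beq_iff_eq.mp heq
      · rintro ⟨m, hm, hx⟩
        have hm0 : m ≠ 0 := by
          rintro rfl; exact hv (by rw [← hx, maskXor_zero])
        refine ⟨(m : Int), PySem.List.mem_pyRange_one.mpr ⟨by exact_mod_cast Nat.one_le_iff_ne_zero.mpr hm0, ?_⟩, ?_⟩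
        · have : ((m : Nat) : Int) < ((2 ^ basis.length : Nat) : Int) := by exact_mod_cast hm
          simpa using this
        · rw [xorOfMask_eq]; exact beq_iff_eq.mpr hx

theorem B_mem (basis : List Int) : ∀ (sp : PySem.Set Int) (v : Int),
    v ∈ basis.foldl spanStep sp ↔
      ∃ x ∈ sp, ∃ m : Nat, m < 2 ^ basis.length ∧ PySem.Int.bxor x (maskXor m basis) = v := by
  induction basis with
  | nil =>
    intro sp v
    constructor
    · intro hv; exact ⟨v, hv, 0, by norm_num, by simp [maskXor, PySem.Int.bxor_zero]⟩
    · rintro ⟨x, hx, m, _, hx2⟩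
      have hxv : x = v := by simpa [maskXor, PySem.Int.bxor_zero] using hx2
      exact hxv ▸ hx
  | cons b rest ih =>
    intro sp v
    rw [List.foldl_cons, ih (spanStep sp b) v]
    have hpow : 2 ^ (b :: rest).length = 2 * 2 ^ rest.length := by
      rw [List.length_cons, pow_succ]; ring
    constructor
    · rintro ⟨x, hx, m, hm, heq⟩
      rcases (PySem.Set.mem_update sp _ x).mp hx with hx' | hx'
      · refine ⟨x, hx', 2 * m, by rw [hpow]; omega, ?_⟩
        rw [maskXor, if_neg (by omega), Nat.mul_div_cancel_left m (by norm_num)]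
        exact heq
      · obtain ⟨y, hy, rfl⟩ := List.mem_map.mp hx'
        refine ⟨y, hy, 2 * m + 1, by rw [hpow]; omega, ?_⟩
        rw [maskXor, if_pos (by omega), show (2 * m + 1) / 2 = m by omega, ← bxor_assoc]
        exact heq
    · rintro ⟨x, hx, m, hm, heq⟩
      have hm' : m < 2 * 2 ^ rest.length := hpow ▸ hm
      by_cases hm2 : m % 2 = 1
      · refine ⟨PySem.Int.bxor x b, (PySem.Set.mem_update sp _ _).mpr (Or.inr (List.mem_map.mpr ⟨x, hx, rfl⟩)),
          m / 2, by omega, ?_⟩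
        rw [maskXor, if_pos hm2] at heq
        rw [bxor_assoc]
        exact heq
      · refine ⟨x, (PySem.Set.mem_update sp _ _).mpr (Or.inl hx), m / 2, by omega, ?_⟩
        rw [maskXor, if_neg hm2] at heq
        exact heq

theorem B_char (v : Int) (basis : List Int) :
    is_lin_dependent_py_alt v basis = true ↔ ∃ m : Nat, m < 2 ^ basis.length ∧ maskXor m basis = v := by
  unfold is_lin_dependent_py_alt
  rw [PySem.Set.contains_iff, B_mem basis (PySem.Set.ofList [0]) v]
  constructor
  · rintro ⟨x, hx, m, hm, heq⟩
    have hx0 : x = 0 := by simpa [PySem.Set.ofList] using hx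
    exact ⟨m, hm, by rwa [hx0, zero_bxor] at heq⟩
  · rintro ⟨m, hm, heq⟩
    exact ⟨0, by simp [PySem.Set.ofList], m, hm, by rwa [zero_bxor]⟩

-- ===== VERDICT (by name: the statement is the Claim_ definition above) =====
theorem is_lin_dependent_py_spec : Claim_equal_is_lin_dependent_py := by
  intro vector basis _
  unfold Spec_is_lin_dependent_py
  have h := (A_char vector basis).trans (B_char vector basis).symm
  cases hA : is_lin_dependent_py vector basis <;> cases hB : is_lin_dependent_py_alt vector basis <;>
    simp_all
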